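-- pv_equiv track=rewrite | github.com/themonty12/Coding_Algorithm | 01.py | solution
-- ===== SOURCE A (Python) =====
-- def solution(s):
--     mid = len(s) // 2
--     for i in range(mid):
--         if s[i] != s[-1 -i]:
--             if len(s) % 2:
--                 result = s[:mid+1] + s[mid-1::-1]
--             else:
--                 result = s[:mid] + s[mid-1::-1]
--             return result
--
--     return ''
-- ===== SOURCE B (Python) =====
-- def solution(s):
--     mid = len(s) // 2
--     left = s[:mid]
--     cand = left + (s[mid] if len(s) % 2 else '') + left[::-1]
--     return '' if cand == s else cand
-- ===== Notes on version B (the rewrite author's own statement) =====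
-- stated objective: simpler
-- what changed: Replaces A's index loop (scan for the first mismatch with negative indexing and an early return) by a straight-line build of the mirrored candidate (left half + optional middle char + reversed left half) followed by a single equality comparison with s, which decides the palindrome case.
import Mathlib
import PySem

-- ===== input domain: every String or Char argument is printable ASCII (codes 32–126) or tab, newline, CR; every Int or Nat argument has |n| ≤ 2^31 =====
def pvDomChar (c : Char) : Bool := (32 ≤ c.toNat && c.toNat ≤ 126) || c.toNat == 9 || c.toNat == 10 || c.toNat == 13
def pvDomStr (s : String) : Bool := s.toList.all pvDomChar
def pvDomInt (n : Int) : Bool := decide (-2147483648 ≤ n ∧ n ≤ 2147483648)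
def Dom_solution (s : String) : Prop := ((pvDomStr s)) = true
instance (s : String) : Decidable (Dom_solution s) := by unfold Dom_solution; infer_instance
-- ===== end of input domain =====

-- B replaces A's index-scanning loop (two-pointer palindrome test with early return)
-- by a straight-line build of the mirrored candidate and one equality comparison (objective: simpler).

-- ===== PORT A =====
-- A's for-loop over range(mid) with early return on the first mismatch
def solutionLoop (cs : List Char) (mid : Nat) (i : Nat) : Option (List Char) :=
  if _h : i < mid then
    if PySem.List.pyGetD cs (i : Int) ' ' ≠ PySem.List.pyGetD cs (-1 - (i : Int)) ' ' then
      if cs.length % 2 = 1 then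
        some (PySem.List.slice cs none (some ((mid : Int) + 1)) ++
              (PySem.List.slice? cs (some ((mid : Int) - 1)) none (-1)).getD [])
      else
        some (PySem.List.slice cs none (some (mid : Int)) ++
              (PySem.List.slice? cs (some ((mid : Int) - 1)) none (-1)).getD [])
    else solutionLoop cs mid (i + 1)
  else none
termination_by mid - i

def solution (s : String) : String :=
  let cs := s.toList
  let mid := cs.length / 2
  match solutionLoop cs mid 0 with
  | some r => String.ofList r
  | none => ""

-- ===== PORT B =====
def solution_alt (s : String) : String :=
  let cs := s.toList
  let mid := cs.length / 2
  let left := cs.take mid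
  let cand := left ++ (if cs.length % 2 = 1 then [PySem.List.pyGetD cs (mid : Int) ' '] else []) ++ left.reverse
  if cand = cs then "" else String.ofList cand

-- ===== PRECONDITION & SPEC =====
def Spec_solution (s : String) (out : String) : Prop := out = solution_alt s
instance (s : String) (out : String) : Decidable (Spec_solution s out) := by unfold Spec_solution; infer_instance

-- ===== CLAIM (what is proved, stated in full; the proofs are below) =====
def Claim_equal_solution : Prop := ∀ (s : String), Dom_solution s → Spec_solution s (solution s)

-- ===== LEMMAS AND PROOFS =====

-- the first-half mirror condition that A's loop tests
def Mir (cs : List Char) (mid : Nat) : Prop :=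
  ∀ j, j < mid → cs.getD j ' ' = cs.getD (cs.length - 1 - j) ' '

-- A's mismatch result, as one expression
def resR (cs : List Char) (mid : Nat) : List Char :=
  if cs.length % 2 = 1 then
    PySem.List.slice cs none (some ((mid : Int) + 1)) ++
      (PySem.List.slice? cs (some ((mid : Int) - 1)) none (-1)).getD []
  else
    PySem.List.slice cs none (some (mid : Int)) ++
      (PySem.List.slice? cs (some ((mid : Int) - 1)) none (-1)).getD []

-- s[mid-1::-1] is the reverse of the first half
theorem slice_rev_eq (cs : List Char) (mid : Nat) (h1 : 1 ≤ mid) (h2 : mid ≤ cs.length) :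
    PySem.List.slice? cs (some ((mid : Int) - 1)) none (-1) = some ((cs.take mid).reverse) := by
  unfold PySem.List.slice? PySem.List.sliceIndices
  have hnn : ¬ ((mid : Int) - 1 < 0) := by omega
  have hmin : min ((mid : Int) - 1) (↑cs.length - 1) = (mid : Int) - 1 := by omega
  simp only [if_neg (by norm_num : ¬ ((-1 : Int) = 0)), if_pos (by norm_num : (-1:Int) < 0),
    if_neg hnn, hmin]
  norm_num
  rw [if_pos (by omega : 0 < mid)]
  rw [List.filterMap_congr (g := fun x => some (cs.getD (mid - 1 - x) ' '))
    (by
      intro x hx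
      have hx' : x < mid := List.mem_range.mp hx
      have hix : (↑mid - 1 + -(x:Int)).toNat = mid - 1 - x := by omega
      simp only [hix, List.getElem?_eq_getElem (show mid-1-x < cs.length by omega)]
      rw [List.getD_eq_getElem cs ' ' (by omega)])]
  rw [show (fun x => some (cs.getD (mid - 1 - x) ' ')) = some ∘ (fun x => cs.getD (mid - 1 - x) ' ') from rfl, List.filterMap_eq_map]
  apply List.ext_getElem
  · simp; omega
  · intro k hk1 hk2
    have htl : (List.take mid cs).length = mid := by simp; omega
    simp only [List.getElem_map, List.getElem_range, List.getElem_reverse, List.getElem_take, htl]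
    rw [List.getD_eq_getElem cs ' ' (by simp at hk1; omega)]

-- closed form of A's loop: none iff the remaining first-half positions mirror, else the fixed result
theorem loop_eq (cs : List Char) (mid : Nat) (hm : mid ≤ cs.length) (i : Nat) :
    solutionLoop cs mid i =
      if (∀ j, i ≤ j → j < mid → cs.getD j ' ' = cs.getD (cs.length - 1 - j) ' ')
      then none else some (resR cs mid) := by
  by_cases hi : i < mid
  case neg =>
    unfold solutionLoop
    rw [dif_neg hi, if_pos (by intro j h1 h2; omega)]
  case pos =>
    have : mid - (i+1) < mid - i := by omega
    have ih := loop_eq cs mid hm (i + 1)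
    unfold solutionLoop
    rw [dif_pos hi]
    have hget1 : PySem.List.pyGetD cs (i : Int) ' ' = cs.getD i ' ' := by
      simp [PySem.List.pyGetD_natCast]
    have hget2 : PySem.List.pyGetD cs (-1 - (i : Int)) ' ' = cs.getD (cs.length - 1 - i) ' ' := by
      have : (-1 - (i : Int)) = -((i+1 : Nat) : Int) := by push_cast; ring
      rw [this, PySem.List.pyGetD_neg_natCast cs (i+1) ' ' (by omega) (by omega)]
      rw [List.getD_eq_getElem cs ' ' (by omega)]
      congr 1
      omega
    rw [hget1, hget2]
    by_cases hne : cs.getD i ' ' = cs.getD (cs.length - 1 - i) ' '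
    case pos =>
      rw [if_neg (not_ne_iff.mpr hne), ih]
      congr 1
      · apply propext
        constructor
        · intro h j h1 h2
          rcases Nat.eq_or_lt_of_le h1 with rfl | h1'
          · exact hne
          · exact h j h1' h2
        · intro h j h1 h2; exact h j (by omega) h2
    case neg =>
      have hforall : ¬ (∀ j, i ≤ j → j < mid → cs.getD j ' ' = cs.getD (cs.length - 1 - j) ' ') :=
        fun h => hne (h i le_rfl hi)
      rw [if_pos (by simpa using hne), if_neg hforall]
      unfold resR
      split <;> rfl
termination_by mid - i

-- the loop's condition over the whole first half says exactly "s is a palindrome"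
theorem mir_iff_palindrome (cs : List Char) :
    Mir cs (cs.length / 2) ↔ cs.reverse = cs := by
  constructor
  · intro h
    apply List.ext_getElem (by simp)
    intro k hk1 hk2
    rw [List.getElem_reverse]
    by_cases hk : k < cs.length / 2
    · have := h k hk
      rw [List.getD_eq_getElem cs ' ' (by omega), List.getD_eq_getElem cs ' ' (by omega)] at this
      exact this.symm
    · by_cases hk' : cs.length - 1 - k < cs.length / 2
      · have := h (cs.length - 1 - k) hk'
        rw [List.getD_eq_getElem cs ' ' (by omega), List.getD_eq_getElem cs ' ' (by omega)] at this
        have hidx : cs.length - 1 - (cs.length - 1 - k) = k := by omega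
        simp only [hidx] at this
        exact this
      · have heq : cs.length - 1 - k = k := by omega
        simp only [heq]
  · intro h j hj
    have hj' : j < cs.length := by omega
    have h1 : cs.reverse[j]? = cs[cs.length - 1 - j]? := List.getElem?_reverse hj'
    rw [h] at h1
    simp only [List.getD, h1]

-- B's candidate equals s exactly when s is a palindrome
theorem cand_eq_iff (cs : List Char) :
    (cs.take (cs.length / 2) ++
      (if cs.length % 2 = 1 then [PySem.List.pyGetD cs ((cs.length / 2 : Nat) : Int) ' '] else []) ++
      (cs.take (cs.length / 2)).reverse) = cs ↔ cs.reverse = cs := by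
  constructor
  · intro h
    conv_lhs => rw [← h]
    conv_rhs => rw [← h]
    simp only [List.reverse_append, List.reverse_reverse]
    split
    · simp
    · simp
  · intro h
    set mid := cs.length / 2 with hmid
    have hkey : cs.take (cs.length - mid) = (cs.drop mid).reverse := by
      have := List.take_reverse (i := cs.length - mid) (xs := cs)
      rw [h] at this
      rw [this, show cs.length - (cs.length - mid) = mid by omega]
    by_cases hodd : cs.length % 2 = 1
    · rw [if_pos hodd]
      have hmlt : mid < cs.length := by omega
      have htakes : cs.take (mid + 1) = cs.take mid ++ [cs[mid]] := by
        rw [List.take_add_one, List.getElem?_eq_getElem hmlt]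
        rfl
      have hdrop : cs.drop mid = cs[mid] :: (cs.take mid).reverse := by
        have h2 : (cs.take (mid + 1)).reverse = cs.drop mid := by
          rw [show mid + 1 = cs.length - mid by omega] at htakes ⊢
          rw [hkey, List.reverse_reverse]
        rw [← h2, htakes]
        simp
      have hg : PySem.List.pyGetD cs ((mid : Nat) : Int) ' ' = cs[mid] := by
        simp [PySem.List.pyGetD_natCast, List.getD, List.getElem?_eq_getElem hmlt]
      rw [hg]
      calc cs.take mid ++ [cs[mid]] ++ (cs.take mid).reverse
          = cs.take mid ++ cs.drop mid := by rw [hdrop]; simp only [List.append_assoc, List.singleton_append]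
        _ = cs := List.take_append_drop mid cs
    · rw [if_neg hodd]
      have hdrop : cs.drop mid = (cs.take mid).reverse := by
        have h2 : cs.length - mid = mid := by omega
        rw [h2] at hkey
        rw [hkey, List.reverse_reverse]
      simp only [List.append_nil]
      rw [← hdrop, List.take_append_drop]

-- on a mismatch (so mid ≥ 1) A's result is B's candidate
theorem resR_eq_cand (cs : List Char) (mid : Nat) (h1 : 1 ≤ mid) (hmid : mid = cs.length / 2) :
    resR cs mid =
      cs.take mid ++
        (if cs.length % 2 = 1 then [PySem.List.pyGetD cs ((mid : Nat) : Int) ' '] else []) ++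
        (cs.take mid).reverse := by
  have hm : mid ≤ cs.length := by omega
  unfold resR
  rw [slice_rev_eq cs mid h1 hm]
  by_cases hodd : cs.length % 2 = 1
  · rw [if_pos hodd, if_pos hodd]
    have hmlt : mid < cs.length := by omega
    have hc1 : ((mid : Int) + 1) = ((mid + 1 : Nat) : Int) := by push_cast; ring
    rw [hc1, PySem.List.slice_to_natCast, List.take_add_one, List.getElem?_eq_getElem hmlt]
    have hg : PySem.List.pyGetD cs ((mid : Nat) : Int) ' ' = cs[mid] := by
      simp [PySem.List.pyGetD_natCast, List.getD, List.getElem?_eq_getElem hmlt]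
    rw [hg]
    simp
  · rw [if_neg hodd, if_neg hodd, PySem.List.slice_to_natCast]
    simp

theorem solution_spec' : ∀ s : String, solution s = solution_alt s := by
  intro s
  show (match solutionLoop s.toList (s.toList.length / 2) 0 with
        | some r => String.ofList r
        | none => "") =
       (if (s.toList.take (s.toList.length / 2) ++
             (if s.toList.length % 2 = 1 then [PySem.List.pyGetD s.toList ((s.toList.length / 2 : Nat) : Int) ' '] else []) ++
             (s.toList.take (s.toList.length / 2)).reverse) = s.toList
        then ""
        else String.ofList (s.toList.take (s.toList.length / 2) ++
             (if s.toList.length % 2 = 1 then [PySem.List.pyGetD s.toList ((s.toList.length / 2 : Nat) : Int) ' '] else []) ++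
             (s.toList.take (s.toList.length / 2)).reverse))
  set cs := s.toList with hcs
  set mid := cs.length / 2 with hmid
  have hm : mid ≤ cs.length := by omega
  rw [loop_eq cs mid hm 0]
  by_cases hM : Mir cs mid
  · rw [if_pos (by intro j _ hj; exact hM j hj)]
    have hpal : cs.reverse = cs := (mir_iff_palindrome cs).mp hM
    rw [if_pos ((cand_eq_iff cs).mpr hpal)]
  · have hM' : ¬ (∀ j, 0 ≤ j → j < mid → cs.getD j ' ' = cs.getD (cs.length - 1 - j) ' ') := by
      intro h; exact hM (fun j hj => h j (Nat.zero_le j) hj)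
    rw [if_neg hM']
    have h1 : 1 ≤ mid := by
      by_contra hc
      exact hM (fun j hj => absurd hj (by omega))
    rw [if_neg (fun hc => hM ((mir_iff_palindrome cs).mpr ((cand_eq_iff cs).mp hc)))]
    rw [resR_eq_cand cs mid h1 hmid]

-- ===== VERDICT (by name: the statement is the Claim_ definition above) =====
theorem solution_spec : Claim_equal_solution := by
  intro s _
  exact solution_spec' s
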